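-- pv_equiv track=rewrite | github.com/Daidai1031/PROMPT- | rules.py | _has_audience_cue
-- ===== SOURCE A (Python) =====
-- from typing import Any, Callable, Dict, List, Optional
--
-- AUDIENCE_CUE_FAMILY = {
--     "aimed", "written", "intended", "targeting", "targeted",
--     "designed", "meant",
--     # "for" and "to" are too generic on their own, so we check them
--     # in combination with a GROUP noun below.
-- }
--
-- GROUP_NOUN_FAMILY = {
--     "kids", "children", "adults", "parents", "teachers", "scientists",
--     "workers", "farmers", "engineers", "experts", "officials",
--     "neighbors", "locals", "residents", "ranchers", "citizens", "voters",
--     "students", "reporters", "readers", "listeners",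
--     "scientist", "worker", "farmer", "expert", "official", "neighbor",
--     "local", "resident", "rancher", "citizen", "voter",
--     "student", "reporter",
--     "someone", "people", "public",
-- }
--
-- def _has_audience_cue(tokens: List[str]) -> bool:
--     """
--     True when the child describes WHO something is aimed at.
--     Either an AUDIENCE_CUE_FAMILY word ("aimed", "written"), or a
--     preposition ("for"/"to") followed nearby by a GROUP_NOUN.
--     """
--     if any(t in AUDIENCE_CUE_FAMILY for t in tokens):
--         return True
--     for i, tok in enumerate(tokens):
--         if tok in {"for", "to", "toward", "towards"}:
--             # look ahead up to 3 tokens for a group noun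
--             for j in range(i + 1, min(i + 4, len(tokens))):
--                 if tokens[j] in GROUP_NOUN_FAMILY:
--                     return True
--     return False
-- ===== SOURCE B (Python) =====
-- AUDIENCE_CUE_FAMILY = {
--     "aimed", "written", "intended", "targeting", "targeted",
--     "designed", "meant",
-- }
--
-- GROUP_NOUN_FAMILY = {
--     "kids", "children", "adults", "parents", "teachers", "scientists",
--     "workers", "farmers", "engineers", "experts", "officials",
--     "neighbors", "locals", "residents", "ranchers", "citizens", "voters",
--     "students", "reporters", "readers", "listeners",
--     "scientist", "worker", "farmer", "expert", "official", "neighbor",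
--     "local", "resident", "rancher", "citizen", "voter",
--     "student", "reporter",
--     "someone", "people", "public",
-- }
--
-- _CUE, _PREP, _NOUN = 2, 1, 3
--
-- def _kind(t):
--     # classify a token: 2 = audience cue word, 1 = preposition, 3 = group noun, 0 = other
--     if t in AUDIENCE_CUE_FAMILY:
--         return _CUE
--     if t in ("for", "to", "toward", "towards"):
--         return _PREP
--     if t in GROUP_NOUN_FAMILY:
--         return _NOUN
--     return 0
--
-- def _has_audience_cue(tokens):
--     # Two stages: classify every token into a small integer alphabet, then scan
--     # the kind sequence with a countdown window: a preposition arms a 3-token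
--     # window; a group noun inside an armed window (or any cue word) fires.
--     kinds = [_kind(t) for t in tokens]
--     window = 0
--     for k in kinds:
--         if k == _CUE:
--             return True
--         if k == _PREP:
--             window = 3
--         else:
--             if k == _NOUN and window > 0:
--                 return True
--             if window > 0:
--                 window -= 1
--     return False
-- ===== Notes on version B (the rewrite author's own statement) =====
-- stated objective: alternative
-- what changed: Replaced A's any()-pass over cue words plus a per-preposition forward lookahead (scan the next 3 tokens for a group noun) by a two-stage pipeline: first map every token to a small integer kind, then one scan of the kind sequence with a countdown window (a preposition arms window=3, decremented each step) that fires on a group noun while the window is armed.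
import Mathlib
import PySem

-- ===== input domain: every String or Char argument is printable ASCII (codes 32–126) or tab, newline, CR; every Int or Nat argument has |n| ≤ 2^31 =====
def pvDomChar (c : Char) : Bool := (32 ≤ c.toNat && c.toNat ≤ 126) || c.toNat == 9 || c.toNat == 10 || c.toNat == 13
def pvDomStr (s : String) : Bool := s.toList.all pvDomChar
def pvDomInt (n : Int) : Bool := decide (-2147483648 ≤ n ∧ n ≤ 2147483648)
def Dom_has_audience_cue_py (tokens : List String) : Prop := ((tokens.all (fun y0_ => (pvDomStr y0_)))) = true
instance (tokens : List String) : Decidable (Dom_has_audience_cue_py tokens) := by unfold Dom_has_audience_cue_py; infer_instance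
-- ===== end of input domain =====

-- B changes the decomposition: instead of A's any()-pass plus nested forward
-- lookahead, it first maps every token to an integer kind and then scans the
-- kind sequence once with a countdown window.

-- ===== PORT A =====
-- A's module-level set constants, as membership tests
def pvCueA (t : String) : Bool :=
  ["aimed", "written", "intended", "targeting", "targeted", "designed", "meant"].contains t

def pvNounA (t : String) : Bool :=
  ["kids", "children", "adults", "parents", "teachers", "scientists",
   "workers", "farmers", "engineers", "experts", "officials",
   "neighbors", "locals", "residents", "ranchers", "citizens", "voters",
   "students", "reporters", "readers", "listeners",
   "scientist", "worker", "farmer", "expert", "official", "neighbor",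
   "local", "resident", "rancher", "citizen", "voter",
   "student", "reporter",
   "someone", "people", "public"].contains t

def pvPrepA (t : String) : Bool := ["for", "to", "toward", "towards"].contains t

-- A: an any()-pass for cue words, then for each preposition a forward lookahead of
-- up to 3 tokens for a group noun.  tokens[j] is in range here, so pyGetD is exact.
def has_audience_cue_py (tokens : List String) : Bool :=
  if tokens.any (fun t => pvCueA t) then true
  else
    (PySem.List.enumerate tokens 0).any (fun p =>
      pvPrepA p.2 &&
        (PySem.List.pyRange (p.1 + 1) (min (p.1 + 4) (tokens.length : Int)) 1).any
          (fun j => pvNounA (PySem.List.pyGetD tokens j "")))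

-- ===== PORT B =====
-- B's classifier _kind: token -> 2 (cue) / 1 (preposition) / 3 (group noun) / 0
def pvKind (t : String) : Int :=
  if ["aimed", "written", "intended", "targeting", "targeted", "designed",
      "meant"].contains t then 2
  else if ["for", "to", "toward", "towards"].contains t then 1
  else if ["kids", "children", "adults", "parents", "teachers", "scientists",
           "workers", "farmers", "engineers", "experts", "officials",
           "neighbors", "locals", "residents", "ranchers", "citizens", "voters",
           "students", "reporters", "readers", "listeners",
           "scientist", "worker", "farmer", "expert", "official", "neighbor",
           "local", "resident", "rancher", "citizen", "voter",
           "student", "reporter",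
           "someone", "people", "public"].contains t then 3
  else 0

-- B's scan over the kind sequence: `window` counts down from 3 after a preposition
def pvScanKinds : List Int → Int → Bool
  | [], _ => false
  | k :: rest, window =>
    if k == 2 then true
    else if k == 1 then pvScanKinds rest 3
    else if k == 3 && window > 0 then true
    else pvScanKinds rest (if window > 0 then window - 1 else window)

def has_audience_cue_py_alt (tokens : List String) : Bool :=
  pvScanKinds (tokens.map (fun t => pvKind t)) 0

-- ===== PRECONDITION & SPEC =====
def Spec_has_audience_cue_py (tokens : List String) (out : Bool) : Prop := out = has_audience_cue_py_alt tokens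
instance (tokens : List String) (out : Bool) : Decidable (Spec_has_audience_cue_py tokens out) := by unfold Spec_has_audience_cue_py; infer_instance

-- ===== CLAIM (what is proved, stated in full; the proofs are below) =====
def Claim_equal_has_audience_cue_py : Prop := ∀ (tokens : List String), Dom_has_audience_cue_py tokens → Spec_has_audience_cue_py tokens (has_audience_cue_py tokens)

-- ===== LEMMAS AND PROOFS =====

-- the common characterisation: a cue word occurs, or a group noun at position k
-- has a preposition at most 3 before it, or (for B's carried state) lies inside
-- the window w still armed on entry
def pvTrig (ts : List String) (w : Int) : Prop :=
  (∃ k, k < ts.length ∧ pvCueA (ts.getD k "") = true) ∨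
  (∃ k, k < ts.length ∧ pvNounA (ts.getD k "") = true ∧
    ((∃ i, i < k ∧ pvPrepA (ts.getD i "") = true ∧ k ≤ i + 3) ∨ (k : Int) < w))

lemma pvPrep_not_noun (t : String) (h : pvPrepA t = true) : pvNounA t = false := by
  simp only [pvPrepA, List.contains_eq_mem, decide_eq_true_eq, List.mem_cons,
    List.not_mem_nil, or_false] at h
  rcases h with h | h | h | h <;> subst h <;> decide

lemma pvKind_def (t : String) :
    pvKind t = (if pvCueA t then 2 else if pvPrepA t then 1 else if pvNounA t then 3 else 0) := by
  simp [pvKind, pvCueA, pvPrepA, pvNounA]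

lemma pvScanKinds_iff (ts : List String) (w : Int) (hw : w ≤ 3) :
    pvScanKinds (ts.map (fun t => pvKind t)) w = true ↔ pvTrig ts w := by
  induction ts generalizing w with
  | nil => simp [pvScanKinds, pvTrig]
  | cons t rest IH =>
    rw [List.map_cons]
    by_cases hc : pvCueA t = true
    · rw [show pvScanKinds (pvKind t :: rest.map (fun t => pvKind t)) w = true by
            simp [pvScanKinds, pvKind_def, hc]]
      simp only [true_iff]
      exact Or.inl ⟨0, by simp, by simpa using hc⟩
    · by_cases hp : pvPrepA t = true
      · rw [show pvScanKinds (pvKind t :: rest.map (fun t => pvKind t)) w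
              = pvScanKinds (rest.map (fun t => pvKind t)) 3 by
              simp [pvScanKinds, pvKind_def, hc, hp]]
        rw [IH 3 (by omega)]
        constructor
        · rintro (⟨k, hk, hcue⟩ | ⟨k, hk, hn, hpre⟩)
          · exact Or.inl ⟨k + 1, by simp; omega, by simpa using hcue⟩
          · refine Or.inr ⟨k + 1, by simp; omega, by simpa using hn, ?_⟩
            rcases hpre with ⟨i, hi, hpi, hle⟩ | hlt
            · exact Or.inl ⟨i + 1, by omega, by simpa using hpi, by omega⟩
            · exact Or.inl ⟨0, by omega, by simpa using hp, by omega⟩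
        · rintro (⟨k, hk, hcue⟩ | ⟨k, hk, hn, hpre⟩)
          · match k with
            | 0 => exact absurd (by simpa using hcue) hc
            | k' + 1 => exact Or.inl ⟨k', by simp at hk; omega, by simpa using hcue⟩
          · match k with
            | 0 => exact absurd (by simpa using hn) (by simp [pvPrep_not_noun t hp])
            | k' + 1 =>
              refine Or.inr ⟨k', by simp at hk; omega, by simpa using hn, ?_⟩
              rcases hpre with ⟨i, hi, hpi, hle⟩ | hlt
              · match i with
                | 0 => exact Or.inr (by omega)
                | i' + 1 => exact Or.inl ⟨i', by omega, by simpa using hpi, by omega⟩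
              · exact Or.inr (by omega)
      · by_cases hn : pvNounA t = true
        · by_cases hwpos : (0 : Int) < w
          · rw [show pvScanKinds (pvKind t :: rest.map (fun t => pvKind t)) w = true by
                  simp only [pvScanKinds, pvKind_def, hc, hp, hn, if_true, if_false,
                    Bool.false_eq_true]
                  simp [hwpos]]
            simp only [true_iff]
            exact Or.inr ⟨0, by simp, by simpa using hn, Or.inr (by omega)⟩
          · have hstep : pvScanKinds (pvKind t :: rest.map (fun t => pvKind t)) w
                = pvScanKinds (rest.map (fun t => pvKind t)) w := by
              have hnw : ¬ ((0 : Int) < w) := by omega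
              simp [pvScanKinds, pvKind_def, hc, hp, hn, hnw]
            rw [hstep, IH w hw]
            constructor
            · rintro (⟨k, hk, hcue⟩ | ⟨k, hk, hn', hpre⟩)
              · exact Or.inl ⟨k + 1, by simp; omega, by simpa using hcue⟩
              · refine Or.inr ⟨k + 1, by simp; omega, by simpa using hn', ?_⟩
                rcases hpre with ⟨i, hi, hpi, hle⟩ | hlt
                · exact Or.inl ⟨i + 1, by omega, by simpa using hpi, by omega⟩
                · exact absurd hlt (by omega)
            · rintro (⟨k, hk, hcue⟩ | ⟨k, hk, hn', hpre⟩)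
              · match k with
                | 0 => exact absurd (by simpa using hcue) hc
                | k' + 1 => exact Or.inl ⟨k', by simp at hk; omega, by simpa using hcue⟩
              · match k with
                | 0 =>
                  rcases hpre with ⟨i, hi, _, _⟩ | hlt
                  · omega
                  · omega
                | k' + 1 =>
                  refine Or.inr ⟨k', by simp at hk; omega, by simpa using hn', ?_⟩
                  rcases hpre with ⟨i, hi, hpi, hle⟩ | hlt
                  · match i with
                    | 0 => exact absurd (by simpa using hpi) hp
                    | i' + 1 => exact Or.inl ⟨i', by omega, by simpa using hpi, by omega⟩
                  · omega
        · have hstep : pvScanKinds (pvKind t :: rest.map (fun t => pvKind t)) w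
              = pvScanKinds (rest.map (fun t => pvKind t)) (if w > 0 then w - 1 else w) := by
            simp [pvScanKinds, pvKind_def, hc, hp, hn]
          rw [hstep, IH _ (by split_ifs <;> omega)]
          constructor
          · rintro (⟨k, hk, hcue⟩ | ⟨k, hk, hn', hpre⟩)
            · exact Or.inl ⟨k + 1, by simp; omega, by simpa using hcue⟩
            · refine Or.inr ⟨k + 1, by simp; omega, by simpa using hn', ?_⟩
              rcases hpre with ⟨i, hi, hpi, hle⟩ | hlt
              · exact Or.inl ⟨i + 1, by omega, by simpa using hpi, by omega⟩
              · refine Or.inr ?_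
                by_cases hwpos : (0 : Int) < w
                · rw [if_pos (by omega)] at hlt; omega
                · rw [if_neg (by omega)] at hlt; omega
          · rintro (⟨k, hk, hcue⟩ | ⟨k, hk, hn', hpre⟩)
            · match k with
              | 0 => exact absurd (by simpa using hcue) hc
              | k' + 1 => exact Or.inl ⟨k', by simp at hk; omega, by simpa using hcue⟩
            · match k with
              | 0 => exact absurd (by simpa using hn') hn
              | k' + 1 =>
                refine Or.inr ⟨k', by simp at hk; omega, by simpa using hn', ?_⟩
                rcases hpre with ⟨i, hi, hpi, hle⟩ | hlt
                · match i with
                  | 0 => exact absurd (by simpa using hpi) hp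
                  | i' + 1 => exact Or.inl ⟨i', by omega, by simpa using hpi, by omega⟩
                · refine Or.inr ?_
                  by_cases hwpos : (0 : Int) < w
                  · rw [if_pos (by omega)]; omega
                  · rw [if_neg (by omega)]; omega

lemma has_audience_cue_py_iff (tokens : List String) :
    has_audience_cue_py tokens = true ↔ pvTrig tokens 0 := by
  by_cases h : tokens.any (fun t => pvCueA t) = true
  · rw [show has_audience_cue_py tokens = true by simp [has_audience_cue_py, h]]
    simp only [true_iff]
    rcases List.any_eq_true.mp h with ⟨x, hx, hcx⟩
    rcases List.mem_iff_getElem.mp hx with ⟨k, hk, hxk⟩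
    exact Or.inl ⟨k, hk, by rw [List.getD_eq_getElem _ _ hk, hxk]; exact hcx⟩
  · rw [show has_audience_cue_py tokens
        = (PySem.List.enumerate tokens 0).any (fun p =>
            pvPrepA p.2 &&
              (PySem.List.pyRange (p.1 + 1) (min (p.1 + 4) (tokens.length : Int)) 1).any
                (fun j => pvNounA (PySem.List.pyGetD tokens j ""))) by
          simp only [has_audience_cue_py, if_neg h]]
    constructor
    · intro ha
      rw [List.any_eq_true] at ha
      obtain ⟨p, hp, hpp⟩ := ha
      rw [Bool.and_eq_true] at hpp
      obtain ⟨hprep, hinner⟩ := hpp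
      rw [PySem.List.mem_enumerate_iff] at hp
      obtain ⟨i, hi, rfl⟩ := hp
      rw [List.any_eq_true] at hinner
      obtain ⟨x, hxmem, hnx⟩ := hinner
      rw [PySem.List.mem_pyRange_one] at hxmem
      obtain ⟨hx1, hx2⟩ := hxmem
      have hx0 : 0 ≤ x := by simp at hx1 ⊢; omega
      have hxlen : x < (tokens.length : Int) := lt_of_lt_of_le hx2 (min_le_right _ _)
      have hget := PySem.List.pyGetD_eq_getElem tokens "" hx0 hxlen
      refine Or.inr ⟨x.toNat, by omega, ?_, Or.inl ⟨i, by simp at hx1; omega,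
        by rw [List.getD_eq_getElem _ _ hi]; exact hprep,
        by simp at hx2; omega⟩⟩
      rw [List.getD_eq_getElem _ _ (by omega), ← hget]
      exact hnx
    · rintro (⟨k, hk, hcue⟩ | ⟨k, hk, hn, hpre⟩)
      · exact absurd (List.any_eq_true.mpr ⟨tokens[k], List.getElem_mem hk,
          by rwa [List.getD_eq_getElem _ _ hk] at hcue⟩) h
      · rcases hpre with ⟨i, hi, hpi, hle⟩ | hlt
        · rw [List.any_eq_true]
          refine ⟨((0 : Int) + (i : Nat), tokens[i]'(by omega)), ?_, ?_⟩
          · rw [PySem.List.mem_enumerate_iff]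
            exact ⟨i, by omega, rfl⟩
          · rw [Bool.and_eq_true]
            constructor
            · simpa using (by rwa [List.getD_eq_getElem _ _ (show i < tokens.length by omega)] at hpi)
            · rw [List.any_eq_true]
              refine ⟨(k : Int), ?_, ?_⟩
              · rw [PySem.List.mem_pyRange_one]
                refine ⟨by omega, ?_⟩
                simp only [lt_min_iff]
                exact ⟨by omega, by exact_mod_cast Nat.cast_lt.mpr hk⟩
              · rw [PySem.List.pyGetD_eq_getElem tokens "" (Int.natCast_nonneg k) (by omega)]
                rw [List.getD_eq_getElem _ _ hk] at hn
                simpa using hn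
        · omega

-- ===== VERDICT (by name: the statement is the Claim_ definition above) =====
theorem has_audience_cue_py_spec : Claim_equal_has_audience_cue_py := by
  intro tokens _
  unfold Spec_has_audience_cue_py
  have hA := has_audience_cue_py_iff tokens
  have hB := pvScanKinds_iff tokens 0 (by omega)
  unfold has_audience_cue_py_alt
  exact Bool.eq_iff_iff.mpr (hA.trans hB.symm)
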